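-- pv_equiv track=rewrite | github.com/macleginn/style-transfer | train_pos_tagger_on_xglue.py | compress_tokens_and_actions
-- ===== SOURCE A (Python) =====
-- def compress_tokens_and_actions(tokens, actions):
--     """
--     Compress the lists of tokens and actions by appending 'skip' actions to the preceding action
--     and appending respective non-first-subword tokens to the preceding token.
--     """
--     compressed_tokens = []
--     compressed_actions = []
--     for token, action in zip(tokens, actions):
--         if action == 'skip':
--             compressed_tokens[-1] += '-'
--             compressed_tokens[-1] += token
--
--             compressed_actions[-1] += ' '
--             compressed_actions[-1] += action
--         else:
--             compressed_tokens.append(token)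
--             compressed_actions.append(action)
--     return compressed_tokens, compressed_actions
-- ===== SOURCE B (Python) =====
-- def compress_tokens_and_actions(tokens, actions):
--     """
--     Compress the lists by scanning the zipped pairs BACK-TO-FRONT: buffer each
--     run of 'skip' entries until its leading non-'skip' entry is reached, then
--     flush the buffer as one joined token ('-') / action (' ') group; finally
--     reverse the collected groups into front-to-back order.
--     """
--     out_tokens, out_actions = [], []
--     run_tokens, run_actions = [], []
--     for token, action in reversed(list(zip(tokens, actions))):
--         run_tokens.append(token)
--         run_actions.append(action)
--         if action != 'skip':
--             out_tokens.append('-'.join(reversed(run_tokens)))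
--             out_actions.append(' '.join(reversed(run_actions)))
--             run_tokens, run_actions = [], []
--     out_tokens.reverse()
--     out_actions.reverse()
--     return out_tokens, out_actions
-- ===== Notes on version B (the rewrite author's own statement) =====
-- stated objective: alternative
-- what changed: B traverses the zipped pairs back-to-front with a run buffer flushed once per group (one join per group, groups collected in reverse and reversed at the end), instead of A's forward pass that mutates the last output string in place with repeated '+=' on every 'skip'.
import Mathlib
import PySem

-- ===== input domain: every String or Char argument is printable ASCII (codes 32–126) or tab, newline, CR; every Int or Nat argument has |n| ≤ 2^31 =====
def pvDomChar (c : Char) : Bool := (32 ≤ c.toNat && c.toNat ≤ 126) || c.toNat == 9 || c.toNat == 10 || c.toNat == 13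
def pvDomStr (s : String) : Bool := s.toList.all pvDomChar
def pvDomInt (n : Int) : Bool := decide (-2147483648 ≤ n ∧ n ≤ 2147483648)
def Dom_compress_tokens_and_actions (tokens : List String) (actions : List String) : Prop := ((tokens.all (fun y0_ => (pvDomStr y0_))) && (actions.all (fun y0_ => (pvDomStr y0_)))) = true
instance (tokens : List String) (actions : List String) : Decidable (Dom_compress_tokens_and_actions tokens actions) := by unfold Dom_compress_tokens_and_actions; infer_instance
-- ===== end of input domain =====

-- B scans the zipped pairs back-to-front, buffering each run and flushing one joined group
-- per non-'skip' entry, instead of A's forward pass mutating the last output string with '+='.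
-- objective: alternative (genuinely different traversal and accumulation, similar cost).


-- ===== PORT A =====
-- 'xs[-1] += suf' : rebuild the last string; [] is Python's IndexError, excluded by Pre_.
def pyAugLast : List String → String → List String
  | [], _ => []
  | [x], suf => [x ++ suf]
  | x :: y :: rest, suf => x :: pyAugLast (y :: rest) suf

def compress_tokens_and_actions (tokens : List String) (actions : List String) : List String × List String :=
  (tokens.zip actions).foldl
    (fun acc ta =>
      if ta.2 == "skip" then
        -- compressed_tokens[-1] += '-'; compressed_tokens[-1] += token (and the same with ' ' ++ action)
        (pyAugLast acc.1 ("-" ++ ta.1), pyAugLast acc.2 (" " ++ ta.2))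
      else
        (acc.1 ++ [ta.1], acc.2 ++ [ta.2]))
    ([], [])

-- ===== PORT B =====
-- for token, action in reversed(list(zip(tokens, actions))): buffer the run; on a non-'skip'
-- action flush '-'.join(reversed(run_tokens)) / ' '.join(reversed(run_actions)); reverse outs at the end.
def compress_tokens_and_actions_alt (tokens : List String) (actions : List String) : List String × List String :=
  let st := ((tokens.zip actions).reverse).foldl
    (fun (st : (List String × List String) × (List String × List String)) ta =>
      let runT := st.2.1 ++ [ta.1]
      let runA := st.2.2 ++ [ta.2]
      if ta.2 != "skip" then
        ((st.1.1 ++ [PySem.Str.join "-" runT.reverse],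
          st.1.2 ++ [PySem.Str.join " " runA.reverse]), ([], []))
      else
        (st.1, (runT, runA)))
    (([], []), ([], []))
  (st.1.1.reverse, st.1.2.reverse)

-- ===== PRECONDITION & SPEC =====
-- Pre_ excludes exactly the inputs where both lists are nonempty and the first action is 'skip':
-- there A indexes [-1] into an empty list and raises IndexError.
def Pre_compress_tokens_and_actions (tokens : List String) (actions : List String) : Prop :=
  tokens = [] ∨ actions = [] ∨ actions.headD "" ≠ "skip"
instance (tokens : List String) (actions : List String) : Decidable (Pre_compress_tokens_and_actions tokens actions) := by unfold Pre_compress_tokens_and_actions; infer_instance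

def pvWitness_compress_tokens_and_actions : List String × List String :=
  (["New", "York", "City", "is"], ["shift", "skip", "skip", "shift"])

def Spec_compress_tokens_and_actions (tokens : List String) (actions : List String) (out : List String × List String) : Prop := out = compress_tokens_and_actions_alt tokens actions
instance (tokens : List String) (actions : List String) (out : List String × List String) : Decidable (Spec_compress_tokens_and_actions tokens actions out) := by unfold Spec_compress_tokens_and_actions; infer_instance

-- ===== CLAIM (what is proved, stated in full; the proofs are below) =====
def Claim_equal_compress_tokens_and_actions : Prop := ∀ (tokens : List String) (actions : List String), Dom_compress_tokens_and_actions tokens actions → Pre_compress_tokens_and_actions tokens actions → Spec_compress_tokens_and_actions tokens actions (compress_tokens_and_actions tokens actions)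

-- ===== LEMMAS AND PROOFS =====

-- common grouping spec: grpCont g s = the groups of g-prefixed s (g is the open group)
def grpCont (g : List (String × String)) : List (String × String) → List (List (String × String))
  | [] => [g]
  | p :: rest => if p.2 == "skip" then grpCont (g ++ [p]) rest else g :: grpCont [p] rest

def joinT (g : List (String × String)) : String := PySem.Str.join "-" (g.map Prod.fst)
def joinA (g : List (String × String)) : String := PySem.Str.join " " (g.map Prod.snd)

def grp : List (String × String) → List (List (String × String))
  | [] => []
  | p :: rest => grpCont [p] rest

theorem chars_join_append_singleton (sep t : List Char) (g : List (List Char)) (h : g ≠ []) :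
    PySem.Chars.join sep (g ++ [t]) = PySem.Chars.join sep g ++ sep ++ t := by
  induction g with
  | nil => exact absurd rfl h
  | cons x xs ih =>
    cases xs with
    | nil => simp [PySem.Chars.join_cons_cons, PySem.Chars.join_singleton]
    | cons y ys =>
      rw [show x :: (y :: ys) ++ [t] = x :: y :: (ys ++ [t]) from rfl,
        PySem.Chars.join_cons_cons,
        show y :: (ys ++ [t]) = (y :: ys) ++ [t] from rfl, ih (by simp),
        PySem.Chars.join_cons_cons]
      simp [List.append_assoc]

theorem join_append_singleton (sep t : String) (g : List String) (h : g ≠ []) :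
    PySem.Str.join sep (g ++ [t]) = PySem.Str.join sep g ++ (sep ++ t) := by
  rw [← String.toList_inj]
  simp only [PySem.Str.toList_join, String.toList_append, List.map_append, List.map_cons,
    List.map_nil]
  rw [chars_join_append_singleton _ _ _ (by simpa using h)]
  simp

theorem join_singleton_str (sep t : String) : PySem.Str.join sep [t] = t := by
  rw [← String.toList_inj]
  simp [PySem.Str.toList_join, PySem.Chars.join_singleton]

theorem joinT_append (g : List (String × String)) (p : String × String) (h : g ≠ []) :
    joinT (g ++ [p]) = joinT g ++ ("-" ++ p.1) := by
  unfold joinT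
  rw [List.map_append, List.map_cons, List.map_nil,
    join_append_singleton _ _ _ (by simpa using h)]

theorem joinA_append (g : List (String × String)) (p : String × String) (h : g ≠ []) :
    joinA (g ++ [p]) = joinA g ++ (" " ++ p.2) := by
  unfold joinA
  rw [List.map_append, List.map_cons, List.map_nil,
    join_append_singleton _ _ _ (by simpa using h)]

theorem pyAugLast_append (done : List String) (x suf : String) :
    pyAugLast (done ++ [x]) suf = done ++ [x ++ suf] := by
  induction done with
  | nil => rfl
  | cons d ds ih =>
    cases ds with
    | nil => simp [pyAugLast]
    | cons e es => simpa [pyAugLast] using ih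

-- A's loop, started with a nonempty open group g already joined at the end of the output
theorem A_loop (s : List (String × String)) :
    ∀ (dT dA : List String) (g : List (String × String)), g ≠ [] →
    s.foldl
      (fun acc ta =>
        if ta.2 == "skip" then
          (pyAugLast acc.1 ("-" ++ ta.1), pyAugLast acc.2 (" " ++ ta.2))
        else
          (acc.1 ++ [ta.1], acc.2 ++ [ta.2]))
      (dT ++ [joinT g], dA ++ [joinA g])
    = (dT ++ (grpCont g s).map joinT, dA ++ (grpCont g s).map joinA) := by
  induction s with
  | nil => intro dT dA g _; simp [grpCont]
  | cons p rest ih =>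
    intro dT dA g hg
    simp only [List.foldl_cons]
    by_cases hs : p.2 == "skip"
    · simp only [hs, if_true]
      rw [pyAugLast_append, pyAugLast_append, ← joinT_append g p hg, ← joinA_append g p hg]
      rw [ih dT dA (g ++ [p]) (by simp)]
      simp [grpCont, hs]
    · simp only [hs, Bool.false_eq_true, if_false]
      have h1 : dT ++ [joinT g] ++ [p.1] = (dT ++ [joinT g]) ++ [joinT [p]] := by
        simp [joinT, join_singleton_str]
      have h2 : dA ++ [joinA g] ++ [p.2] = (dA ++ [joinA g]) ++ [joinA [p]] := by
        simp [joinA, join_singleton_str]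
      rw [h1, h2, ih (dT ++ [joinT g]) (dA ++ [joinA g]) [p] (by simp)]
      simp [grpCont, hs]

def skipP (p : String × String) : Bool := p.2 == "skip"

theorem grpCont_eq (s : List (String × String)) :
    ∀ g, grpCont g s = (g ++ s.takeWhile skipP) :: grp (s.dropWhile skipP) := by
  induction s with
  | nil => intro g; simp [grpCont, grp]
  | cons p rest ih =>
    intro g
    by_cases hs : p.2 == "skip"
    · simp only [grpCont, hs, if_true, List.takeWhile, List.dropWhile, skipP]
      rw [ih (g ++ [p])]
      simp
    · simp only [grpCont, hs, Bool.false_eq_true, if_false, List.takeWhile, List.dropWhile, skipP]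
      simp [grp]

-- B's loop (foldr form): the run buffer holds the reversed leading 'skip'-run of the suffix,
-- the outputs hold (reversed) the joined groups of the rest
theorem B_loop (s : List (String × String)) :
    s.foldr
      (fun ta (st : (List String × List String) × (List String × List String)) =>
        let runT := st.2.1 ++ [ta.1]
        let runA := st.2.2 ++ [ta.2]
        if ta.2 != "skip" then
          ((st.1.1 ++ [PySem.Str.join "-" runT.reverse],
            st.1.2 ++ [PySem.Str.join " " runA.reverse]), ([], []))
        else
          (st.1, (runT, runA)))
      (([], []), ([], []))
    = ((((grp (s.dropWhile skipP)).map joinT).reverse,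
        ((grp (s.dropWhile skipP)).map joinA).reverse),
       (((s.takeWhile skipP).map Prod.fst).reverse,
        ((s.takeWhile skipP).map Prod.snd).reverse)) := by
  induction s with
  | nil => rfl
  | cons p rest ih =>
    simp only [List.foldr_cons, ih]
    by_cases hs : p.2 == "skip"
    · have hb : (p.2 != "skip") = false := by simp [bne, hs]
      simp only [hb, Bool.false_eq_true, if_false]
      simp [List.takeWhile, List.dropWhile, skipP, hs]
    · have hb : (p.2 != "skip") = true := by simp [bne, hs]
      simp only [hb, if_true]
      have htw : (p :: rest).takeWhile skipP = [] := by simp [List.takeWhile, skipP, hs]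
      have hdw : (p :: rest).dropWhile skipP = p :: rest := by simp [List.dropWhile, skipP, hs]
      rw [htw, hdw]
      have hgrp : grp (p :: rest) = (p :: rest.takeWhile skipP) :: grp (rest.dropWhile skipP) := by
        rw [grp, grpCont_eq]; rfl
      rw [hgrp]
      simp [joinT, joinA, List.map_cons]

-- ===== VERDICT (by name: the statement is the Claim_ definition above) =====
theorem compress_tokens_and_actions_spec : Claim_equal_compress_tokens_and_actions := by
  intro tokens actions _ hpre
  unfold Spec_compress_tokens_and_actions compress_tokens_and_actions compress_tokens_and_actions_alt
  cases tokens with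
  | nil => rfl
  | cons t ts =>
    cases actions with
    | nil => rfl
    | cons a as =>
      have ha : a ≠ "skip" := by
        rcases hpre with h | h | h
        · exact absurd h (by simp)
        · exact absurd h (by simp)
        · simpa using h
      have hba : (a == "skip") = false := by simp [ha]
      -- A side
      simp only [List.zip_cons_cons, List.foldl_cons, hba, Bool.false_eq_true, if_false,
        List.nil_append]
      have hA := A_loop (ts.zip as) [] [] [(t, a)] (by simp)
      simp only [List.nil_append, joinT, joinA, List.map_cons, List.map_nil,
        join_singleton_str] at hA
      rw [hA]
      -- B side
      rw [List.foldl_reverse, B_loop]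
      have htw : ((t, a) :: ts.zip as).takeWhile skipP = [] := by
        simp [List.takeWhile, skipP, hba]
      have hdw : ((t, a) :: ts.zip as).dropWhile skipP = (t, a) :: ts.zip as := by
        simp [List.dropWhile, skipP, hba]
      simp only [hdw, grp, List.reverse_reverse]
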